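-- pv_equiv track=rewrite | github.com/CGraciolli/Blending-Images | image.py | separate_rgba_matrix
-- ===== SOURCE A (Python) =====
-- def separate_rgba_matrix(pix_matrix):
--     """
--     recives a matrix with the RGBA representation of an image
--     returns a list of matrixes, each representing red, green, blue or the trasnparency
--     """
--     list_matrixes_rgba = []
--     ##the first matrix in the list represents red, the second green,
--     ## the third blue and the fourth the transparency
--     for _ in range(4):
--         list_matrixes_rgba.append([])
--     for row in pix_matrix:
--         row_list = []
--         for _ in range(4):
--             row_list.append([])
--         for elem in row:
--             for i in range(4):
--                 row_list[i].append(elem[i])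
--         for i in range(4):
--             list_matrixes_rgba[i].append(row_list[i])
--     return list_matrixes_rgba
-- ===== SOURCE B (Python) =====
-- def separate_rgba_matrix(pix_matrix):
--     """
--     recives a matrix with the RGBA representation of an image
--     returns a list of matrixes, each representing red, green, blue or the trasnparency
--     """
--     return [[[elem[i] for elem in row] for row in pix_matrix] for i in range(4)]
-- ===== Notes on version B (the rewrite author's own statement) =====
-- stated objective: simpler
-- what changed: B builds each channel matrix with a full independent pass per channel (channel as the outermost loop, a one-line nested comprehension) instead of A's single interleaved pass maintaining four row-accumulators at once.
import Mathlib
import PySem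

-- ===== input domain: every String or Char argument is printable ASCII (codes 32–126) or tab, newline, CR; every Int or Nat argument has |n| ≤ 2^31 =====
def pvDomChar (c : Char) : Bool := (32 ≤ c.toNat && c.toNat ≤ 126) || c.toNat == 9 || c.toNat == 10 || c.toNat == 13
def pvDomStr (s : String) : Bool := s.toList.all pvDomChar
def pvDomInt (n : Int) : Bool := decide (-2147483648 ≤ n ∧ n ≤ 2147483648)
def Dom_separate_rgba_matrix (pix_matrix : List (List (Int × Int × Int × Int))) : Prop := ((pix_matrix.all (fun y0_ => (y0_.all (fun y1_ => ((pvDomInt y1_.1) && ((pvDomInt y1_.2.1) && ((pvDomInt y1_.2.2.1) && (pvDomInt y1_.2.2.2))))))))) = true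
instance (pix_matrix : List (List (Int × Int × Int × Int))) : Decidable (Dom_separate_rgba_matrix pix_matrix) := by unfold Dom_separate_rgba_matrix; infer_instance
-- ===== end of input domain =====

-- B replaces A's single interleaved pass (four row-accumulators maintained at once)
-- by four independent per-channel passes, one nested comprehension per channel (objective: simpler).

-- ===== PORT A =====
-- A's row_list: four lists built in one pass over the row's elements, elem[i] appended to row_list[i]
def pvRowStep (rl : List Int × List Int × List Int × List Int) (e : Int × Int × Int × Int) :
    List Int × List Int × List Int × List Int :=
  (rl.1 ++ [e.1], rl.2.1 ++ [e.2.1], rl.2.2.1 ++ [e.2.2.1], rl.2.2.2 ++ [e.2.2.2])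

-- A's outer loop: append row_list[i] to list_matrixes_rgba[i] for each row
def pvMatStep (L : List (List Int) × List (List Int) × List (List Int) × List (List Int))
    (row : List (Int × Int × Int × Int)) :
    List (List Int) × List (List Int) × List (List Int) × List (List Int) :=
  let rl := row.foldl pvRowStep ([], [], [], [])
  (L.1 ++ [rl.1], L.2.1 ++ [rl.2.1], L.2.2.1 ++ [rl.2.2.1], L.2.2.2 ++ [rl.2.2.2])

def separate_rgba_matrix (pix_matrix : List (List (Int × Int × Int × Int))) : List (List (List Int)) :=
  let L := pix_matrix.foldl pvMatStep ([], [], [], [])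
  [L.1, L.2.1, L.2.2.1, L.2.2.2]

-- ===== PORT B =====
-- one full pass per channel: [[[elem[i] for elem in row] for row in pix_matrix] for i in range(4)]
def pvChannel (f : Int × Int × Int × Int → Int) (pix_matrix : List (List (Int × Int × Int × Int))) :
    List (List Int) :=
  pix_matrix.map (fun row => row.map f)

def separate_rgba_matrix_alt (pix_matrix : List (List (Int × Int × Int × Int))) : List (List (List Int)) :=
  [pvChannel (·.1) pix_matrix, pvChannel (·.2.1) pix_matrix,
   pvChannel (·.2.2.1) pix_matrix, pvChannel (·.2.2.2) pix_matrix]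

-- ===== PRECONDITION & SPEC =====
def Spec_separate_rgba_matrix (pix_matrix : List (List (Int × Int × Int × Int))) (out : List (List (List Int))) : Prop := out = separate_rgba_matrix_alt pix_matrix
instance (pix_matrix : List (List (Int × Int × Int × Int))) (out : List (List (List Int))) : Decidable (Spec_separate_rgba_matrix pix_matrix out) := by unfold Spec_separate_rgba_matrix; infer_instance

-- ===== CLAIM (what is proved, stated in full; the proofs are below) =====
def Claim_equal_separate_rgba_matrix : Prop := ∀ (pix_matrix : List (List (Int × Int × Int × Int))), Dom_separate_rgba_matrix pix_matrix → Spec_separate_rgba_matrix pix_matrix (separate_rgba_matrix pix_matrix)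

-- ===== LEMMAS AND PROOFS =====
theorem pvRow_fold (row : List (Int × Int × Int × Int)) (rl : List Int × List Int × List Int × List Int) :
    row.foldl pvRowStep rl =
      (rl.1 ++ row.map (·.1), rl.2.1 ++ row.map (·.2.1),
       rl.2.2.1 ++ row.map (·.2.2.1), rl.2.2.2 ++ row.map (·.2.2.2)) := by
  induction row generalizing rl with
  | nil => simp
  | cons e t ih => simp [pvRowStep, ih]

theorem pvMat_fold (m : List (List (Int × Int × Int × Int)))
    (L : List (List Int) × List (List Int) × List (List Int) × List (List Int)) :
    m.foldl pvMatStep L =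
      (L.1 ++ m.map (fun r => r.map (·.1)), L.2.1 ++ m.map (fun r => r.map (·.2.1)),
       L.2.2.1 ++ m.map (fun r => r.map (·.2.2.1)), L.2.2.2 ++ m.map (fun r => r.map (·.2.2.2))) := by
  induction m generalizing L with
  | nil => simp
  | cons row t ih => simp [pvMatStep, pvRow_fold, ih]

-- ===== VERDICT (by name: the statement is the Claim_ definition above) =====
theorem separate_rgba_matrix_spec : Claim_equal_separate_rgba_matrix := by
  intro m _
  unfold Spec_separate_rgba_matrix separate_rgba_matrix separate_rgba_matrix_alt pvChannel
  simp [pvMat_fold]
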